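-- pv_equiv track=rewrite | github.com/Tomusss/programowanie | lista3/zad2.py | zaprzyjaznione
-- ===== SOURCE A (Python) =====
-- import math
--
-- def dzielniki_wlasciwe(liczba):
--     if liczba == 1:
--         return []
--     dzielniki = [1]
--     for x in range(2,math.floor(liczba/2)+2):
--         if liczba%x == 0:
--             dzielniki.append(x)
--     return dzielniki
--
-- def zaprzyjaznione(n):
--     dzielniki = {}
--     przyjaciele = []
--     if n == 1:
--         return None
--     for x in range(1,n+1):
--         dzielniki[x]=sum(dzielniki_wlasciwe(x))
--     for liczba in dzielniki:
--         liczba2 = dzielniki[liczba]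
--         if liczba != liczba2:
--             if 1 < liczba2 < n:
--                 if liczba == dzielniki[liczba2]:
--                     if (liczba2, liczba) not in przyjaciele:
--                         przyjaciele.append((liczba,liczba2))
--     return len(przyjaciele)
-- ===== SOURCE B (Python) =====
-- def zaprzyjaznione(n):
--     if n == 1:
--         return None
--     s = [0] * (n + 1) if n >= 1 else []
--     for d in range(1, n + 1):
--         for m in range(2 * d, n + 1, d):
--             s[m] += d
--     count = 0
--     for a in range(1, n + 1):
--         b = s[a]
--         if a < b <= n and s[b] == a:
--             count += 1
--     return count
-- ===== Notes on version B (the rewrite author's own statement) =====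
-- stated objective: faster
-- what changed: replaces per-number trial division up to x/2 plus a dict-and-pair-list membership scan with a divisor-sum sieve (each d added to its multiples) followed by a single counting pass over a < s[a] <= n with s[s[a]] == a
import Mathlib
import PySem

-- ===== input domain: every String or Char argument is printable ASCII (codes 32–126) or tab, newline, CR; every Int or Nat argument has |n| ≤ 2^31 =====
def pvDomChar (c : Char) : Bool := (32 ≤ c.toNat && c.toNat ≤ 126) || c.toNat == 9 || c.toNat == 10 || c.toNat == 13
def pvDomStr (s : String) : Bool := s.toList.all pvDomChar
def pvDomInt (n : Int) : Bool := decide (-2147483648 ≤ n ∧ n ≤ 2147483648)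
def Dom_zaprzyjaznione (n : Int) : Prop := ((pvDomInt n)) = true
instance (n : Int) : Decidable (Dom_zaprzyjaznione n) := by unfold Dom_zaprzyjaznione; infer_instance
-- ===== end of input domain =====

-- B replaces A's per-number trial division (and its dict/pair-list bookkeeping) by a divisor-sum
-- sieve plus one counting pass; a timing run measures the speed-up (asymptotic: O(n^2) → O(n log n)).

-- ===== PORT A =====
-- dzielniki_wlasciwe: trial division from 2 to floor(x/2)+1 (math.floor(x/2) = x//2 exactly,
-- since |x| ≤ 2^31 < 2^53 makes the float division x/2 exact).
def pvDW (x : Int) : List Int :=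
  if x = 1 then []
  else (PySem.List.pyRange 2 (PySem.Int.floordiv x 2 + 2) 1).foldl
      (fun acc d => if PySem.Int.mod x d = 0 then acc ++ [d] else acc) [1]

def pvSA (x : Int) : Int := (pvDW x).sum

def zaprzyjaznione (n : Int) : Option Int :=
  if n = 1 then none
  else
    let dz : PySem.Dict Int Int :=
      (PySem.List.pyRange 1 (n+1) 1).foldl (fun d x => d.insert x (pvSA x)) PySem.Dict.empty
    let prz : List (Int × Int) :=
      dz.keys.foldl (fun prz a =>
        let b := dz.getD a 0
        -- Python's nested ifs, incl. guarded read dzielniki[liczba2] (key present when 1 < b < n)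
        if a ≠ b ∧ 1 < b ∧ b < n ∧ dz.getD b 0 = a ∧ (b, a) ∉ prz
        then prz ++ [(a, b)] else prz) []
    some (PySem.List.len prz)

-- ===== PORT B =====
def zaprzyjaznione_alt (n : Int) : Option Int :=
  if n = 1 then none
  else
    let s0 : List Int := if 1 ≤ n then PySem.List.pyRepeat [(0 : Int)] (n+1) else []
    let s : List Int :=
      (PySem.List.pyRange 1 (n+1) 1).foldl (fun s d =>
        (PySem.List.pyRange (2*d) (n+1) d).foldl
          (fun s m => PySem.List.pySetD s m (PySem.List.pyGetD s m 0 + d)) s) s0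
    let cnt : Int :=
      (PySem.List.pyRange 1 (n+1) 1).foldl (fun c a =>
        let b := PySem.List.pyGetD s a 0
        if a < b ∧ b ≤ n ∧ PySem.List.pyGetD s b 0 = a then c + 1 else c) 0
    some cnt

-- ===== PRECONDITION & SPEC =====
def Spec_zaprzyjaznione (n : Int) (out : Option Int) : Prop := out = zaprzyjaznione_alt n
instance (n : Int) (out : Option Int) : Decidable (Spec_zaprzyjaznione n out) := by unfold Spec_zaprzyjaznione; infer_instance

-- ===== CLAIM (what is proved, stated in full; the proofs are below) =====
def Claim_equal_zaprzyjaznione : Prop := ∀ (n : Int), Dom_zaprzyjaznione n → Spec_zaprzyjaznione n (zaprzyjaznione n)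

-- ===== LEMMAS AND PROOFS =====

-- σ: the proper-divisor sum, the common reference value of both programs' inner computations
def pvSigma (x : Int) : Int := ((∑ d ∈ x.toNat.properDivisors, d : ℕ) : Int)

-- the predicate A's loop effectively counts (shown by the loop invariant below)
def pvQ (n a : Int) : Bool :=
  decide (a ≠ pvSA a ∧ 1 < pvSA a ∧ pvSA a < n ∧ pvSA (pvSA a) = a ∧
    (a < pvSA a ∨ ¬(1 < a ∧ a < n)))

-- pvQ with pvSA replaced by pvSigma
def pvQ' (n a : Int) : Bool :=
  decide (a ≠ pvSigma a ∧ 1 < pvSigma a ∧ pvSigma a < n ∧ pvSigma (pvSigma a) = a ∧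
    (a < pvSigma a ∨ ¬(1 < a ∧ a < n)))

-- the predicate B's loop counts
def pvR (n a : Int) : Bool := decide (a < pvSigma a ∧ pvSigma a ≤ n ∧ pvSigma (pvSigma a) = a)

-- ---------- small facts about pvSigma / pvSA ----------

-- a proper divisor is at most half
theorem pv_dvd_two_mul (d A : ℕ) (hd : d ∣ A) (hlt : d < A) : 2 * d ≤ A := by
  obtain ⟨c, rfl⟩ := hd
  rcases Nat.lt_or_ge c 2 with hc | hc
  · interval_cases c <;> omega
  · calc 2 * d = d * 2 := by ring
    _ ≤ d * c := Nat.mul_le_mul_left d hc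

-- Nat form: A's trial-division sum equals the proper-divisor sum, for 3 ≤ N
theorem pv_nat_sum (N : ℕ) (h3 : 3 ≤ N) :
    1 + ∑ k ∈ Finset.range (N / 2), (if (2 + k) ∣ N then 2 + k else 0) =
      ∑ d ∈ N.properDivisors, d := by
  have h1 : ∑ k ∈ Finset.range (N / 2), (if (2 + k) ∣ N then 2 + k else 0)
      = ∑ d ∈ Finset.Ico 2 (N / 2 + 2), (if d ∣ N then d else 0) := by
    rw [Finset.sum_Ico_eq_sum_range]
    simp
  have h2 : (Finset.Ico 2 (N / 2 + 2)).filter (· ∣ N) = N.properDivisors.erase 1 := by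
    ext d
    simp only [Finset.mem_filter, Finset.mem_Ico, Finset.mem_erase, Nat.mem_properDivisors]
    constructor
    · rintro ⟨⟨h2d, hdu⟩, hdvd⟩
      have hdN : d ≤ N := Nat.le_of_dvd (by omega) hdvd
      have : d < N := by omega
      exact ⟨by omega, hdvd, this⟩
    · rintro ⟨hne, hdvd, hlt⟩
      have hd1 : 1 ≤ d := Nat.one_le_iff_ne_zero.2 (by rintro rfl; simp at hdvd; omega)
      have := pv_dvd_two_mul d N hdvd hlt
      exact ⟨⟨by omega, by omega⟩, hdvd⟩
  have h1N : 1 ∈ N.properDivisors := Nat.mem_properDivisors.2 ⟨one_dvd N, by omega⟩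
  rw [h1, ← Finset.sum_filter, h2]
  rw [← Finset.add_sum_erase _ _ h1N]

theorem pv_sum_range_ite (m : ℕ) (q : ℕ → Bool) (f : ℕ → Int) :
    (((List.range m).filter q).map f).sum = ∑ k ∈ Finset.range m, if q k then f k else 0 := by
  induction m with
  | zero => simp
  | succ m ih =>
      rw [List.range_succ, Finset.sum_range_succ, List.filter_append, List.map_append,
        List.sum_append, ih]
      by_cases h : q m <;> simp [h]

theorem pvSA_eq_sigma (x : Int) (hx : 3 ≤ x) : pvSA x = pvSigma x := by
  obtain ⟨N, rfl⟩ : ∃ N : ℕ, x = (N : Int) := ⟨x.toNat, by omega⟩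
  have hN : 3 ≤ N := by exact_mod_cast hx
  unfold pvSA pvDW
  rw [if_neg (by omega), PySem.List.foldl_append_ite_eq_filter
    (p := fun d => PySem.Int.mod (N : Int) d = 0)]
  rw [show PySem.Int.floordiv (N : Int) 2 = ((N / 2 : ℕ) : Int) from
    PySem.Int.floordiv_natCast N 2]
  rw [PySem.List.pyRange_one]
  rw [show (((N / 2 : ℕ) : Int) + 2 - 2).toNat = N / 2 by omega]
  rw [List.filter_map]
  have hcond : ∀ k : ℕ, (decide (PySem.Int.mod (N:Int) (2 + (k:Int)) = 0))
      = decide ((2 + k) ∣ N) := by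
    intro k
    simp only [decide_eq_decide, PySem.Int.mod_eq_zero_iff_dvd]
    constructor
    · intro h; exact_mod_cast h
    · intro h; exact_mod_cast h
  rw [show ((fun x => decide (PySem.Int.mod ((N:ℕ) : Int) x = 0)) ∘ fun k : ℕ => 2 + (k:Int))
      = fun k : ℕ => decide (PySem.Int.mod ((N:ℕ):Int) (2 + (k:Int)) = 0) from rfl]
  rw [List.filter_congr (fun k _ => hcond k)]
  rw [List.sum_append, List.sum_singleton, pv_sum_range_ite]
  have : (∑ k ∈ Finset.range (N / 2), if (2 + k) ∣ N then (2 + (k:Int)) else 0)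
      = ((∑ k ∈ Finset.range (N / 2), if (2 + k) ∣ N then 2 + k else 0 : ℕ) : Int) := by
    push_cast
    refine Finset.sum_congr rfl (fun k _ => ?_)
    split_ifs <;> push_cast <;> ring
  simp only [decide_eq_true_eq]
  rw [this]
  unfold pvSigma
  rw [show ((N:Int)).toNat = N by omega, ← pv_nat_sum N hN]
  push_cast
  ring


theorem pvSA_one : pvSA 1 = 0 := by decide
theorem pvSA_two : pvSA 2 = 3 := by decide
theorem pvSA_three : pvSA 3 = 1 := by decide
theorem pvSigma_one : pvSigma 1 = 0 := by decide
theorem pvSigma_two : pvSigma 2 = 1 := by decide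
theorem pvSigma_three : pvSigma 3 = 1 := by decide
theorem pvSA_eq_sigma' (x : Int) (hx : x ≠ 2) (h1 : 1 ≤ x) : pvSA x = pvSigma x := by
  rcases lt_trichotomy x 2 with h | h | h
  · have : x = 1 := by omega
    subst this; exact pvSA_one.trans pvSigma_one.symm
  · exact absurd h hx
  · exact pvSA_eq_sigma x (by omega)

-- ---------- the dictionary of A ----------

theorem pv_dict_getD_notmem (L : List Int) (f : Int → Int) (d : PySem.Dict Int Int) (x : Int)
    (hx : x ∉ L) :
    (L.foldl (fun d k => d.insert k (f k)) d).getD x 0 = d.getD x 0 := by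
  induction L generalizing d with
  | nil => rfl
  | cons k L ih =>
      simp only [List.foldl_cons]
      simp only [List.mem_cons, not_or] at hx
      rw [ih _ hx.2]
      exact PySem.Dict.getD_insert_of_ne _ _ _ hx.1

theorem pv_dict_getD (L : List Int) (f : Int → Int) (d : PySem.Dict Int Int) (x : Int)
    (hL : L.Nodup) (hx : x ∈ L) :
    (L.foldl (fun d k => d.insert k (f k)) d).getD x 0 = f x := by
  induction L generalizing d with
  | nil => simp at hx
  | cons k L ih =>
      simp only [List.foldl_cons]
      rcases List.mem_cons.1 hx with rfl | hx'
      · rw [pv_dict_getD_notmem _ _ _ _ (List.nodup_cons.1 hL).1]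
        exact PySem.Dict.getD_insert_self _ _ _ _
      · exact ih _ (List.nodup_cons.1 hL).2 hx'

theorem pv_dict_keys (L : List Int) (f : Int → Int) (hL : L.Nodup) :
    (L.foldl (fun d k => d.insert k (f k)) PySem.Dict.empty).keys = L := by
  rw [PySem.Dict.keys_foldl_insert]
  rw [PySem.Dict.keys_empty, PySem.Set.update_nil_left, PySem.Set.ofList_eq_self_of_nodup _ hL]

-- ---------- the sieve of B ----------

theorem pv_inner_foldl (L : List Int) (c : Int) (s : List Int) (j : ℕ)
    (hnd : L.Nodup) (hpos : ∀ m ∈ L, 0 ≤ m) :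
    (L.foldl (fun s m => PySem.List.pySetD s m (PySem.List.pyGetD s m 0 + c)) s).getD j 0
      = s.getD j 0 + (if (j : Int) ∈ L ∧ j < s.length then c else 0) := by
  induction L generalizing s with
  | nil => simp
  | cons m L ih =>
      rcases List.nodup_cons.1 hnd with ⟨hm, hnd'⟩
      have hm0 : 0 ≤ m := hpos m (List.mem_cons_self ..)
      have key : ∀ (t : List Int), (t.set m.toNat (t.getD m.toNat 0 + c)).getD j 0
          = t.getD j 0 + (if (j : Int) = m ∧ j < t.length then c else 0) := by
        intro t
        by_cases hjm : (j : Int) = m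
        · rw [show m.toNat = j from by omega]
          by_cases hlt : j < t.length
          · rw [List.getD_eq_getElem?_getD, List.getElem?_set_self (by omega),
              List.getD_eq_getElem?_getD]
            simp [List.getElem?_eq_getElem hlt, hjm, hlt]
          · rw [List.set_eq_of_length_le (by omega)]
            simp [hjm, hlt]
        · rw [List.getD_eq_getElem?_getD, List.getElem?_set_ne (by omega),
            ← List.getD_eq_getElem?_getD]
          simp [hjm]
      simp only [List.foldl_cons]
      rw [PySem.List.pySetD_of_nonneg _ _ hm0, PySem.List.pyGetD_of_nonneg _ _ hm0,
        ih _ hnd' (fun x hx => hpos x (List.mem_cons_of_mem _ hx)), key, List.length_set]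
      simp only [List.mem_cons]
      by_cases h1 : (j:Int) = m <;> by_cases h2 : (j:Int) ∈ L <;> by_cases h3 : j < s.length <;>
        simp_all

theorem pv_inner_len (L : List Int) (c : Int) (s : List Int) (hpos : ∀ m ∈ L, 0 ≤ m) :
    (L.foldl (fun s m => PySem.List.pySetD s m (PySem.List.pyGetD s m 0 + c)) s).length
      = s.length := by
  induction L generalizing s with
  | nil => rfl
  | cons m L ih =>
      simp only [List.foldl_cons]
      rw [ih _ (fun x hx => hpos x (List.mem_cons_of_mem _ hx)),
        PySem.List.pySetD_of_nonneg _ _ (hpos m (List.mem_cons_self ..)), List.length_set]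

theorem pv_nodup_pyRange_pos (a b s : Int) (hs : 0 < s) : (PySem.List.pyRange a b s).Nodup := by
  rw [PySem.List.pyRange_of_pos a b hs]
  refine List.Nodup.map ?_ (List.nodup_range)
  intro u v h
  dsimp only at h
  have h2 : s * (u:Int) = s * v := by linarith
  have : (u:Int) = v := mul_left_cancel₀ (by omega) h2
  exact_mod_cast this

theorem pv_outer (n : Int) (L : List Int) (hL : ∀ d ∈ L, 1 ≤ d) (s : List Int) (j : ℕ)
    (hj : j < s.length) :
    ((L.foldl (fun s d =>
        (PySem.List.pyRange (2*d) (n+1) d).foldl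
          (fun s m => PySem.List.pySetD s m (PySem.List.pyGetD s m 0 + d)) s) s).getD j 0)
      = s.getD j 0
        + (L.filter (fun d => decide ((j:Int) ∈ PySem.List.pyRange (2*d) (n+1) d))).sum := by
  induction L generalizing s with
  | nil => simp
  | cons d L ih =>
      have hd : 1 ≤ d := hL d (List.mem_cons_self ..)
      have hmempos : ∀ m ∈ PySem.List.pyRange (2*d) (n+1) d, 0 ≤ m := by
        intro m hm
        have := (PySem.List.mem_pyRange_iff_of_pos (by omega) m).1 hm
        omega
      have hlen := pv_inner_len (PySem.List.pyRange (2*d) (n+1) d) d s hmempos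
      simp only [List.foldl_cons, List.filter_cons]
      rw [ih (fun x hx => hL x (List.mem_cons_of_mem _ hx)) _ (by rw [hlen]; exact hj)]
      rw [pv_inner_foldl _ _ _ _ (pv_nodup_pyRange_pos _ _ _ (by omega)) hmempos]
      by_cases hmem : (j:Int) ∈ PySem.List.pyRange (2*d) (n+1) d <;>
        simp [hmem, hj] <;> ring

theorem pv_nat_sum2 (A n' : ℕ) (h1 : 1 ≤ A) (h2 : A ≤ n') :
    ∑ k ∈ Finset.range n', (if (1+k) ∣ A ∧ 2*(1+k) ≤ A then 1+k else 0)
      = ∑ d ∈ A.properDivisors, d := by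
  have h0 : ∑ d ∈ Finset.Ico 1 (1+n'), (if d ∣ A ∧ 2*d ≤ A then d else 0)
      = ∑ k ∈ Finset.range n', (if (1+k) ∣ A ∧ 2*(1+k) ≤ A then 1+k else 0) := by
    rw [Finset.sum_Ico_eq_sum_range]
    simp
  rw [← h0, ← Finset.sum_filter]
  apply Finset.sum_congr _ (fun _ _ => rfl)
  ext d
  simp only [Finset.mem_filter, Finset.mem_Ico, Nat.mem_properDivisors]
  constructor
  · rintro ⟨⟨hd1, hdu⟩, hdvd, hdle⟩
    exact ⟨hdvd, by omega⟩
  · rintro ⟨hdvd, hlt⟩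
    have hd1 : 1 ≤ d := Nat.one_le_iff_ne_zero.2 (by rintro rfl; simp at hdvd; omega)
    have := pv_dvd_two_mul d A hdvd hlt
    exact ⟨⟨hd1, by omega⟩, hdvd, this⟩

theorem pv_sieve (n : Int) (hn : 1 ≤ n) (a : Int) (ha1 : 1 ≤ a) (han : a ≤ n) :
    ((PySem.List.pyRange 1 (n+1) 1).foldl (fun s d =>
        (PySem.List.pyRange (2*d) (n+1) d).foldl
          (fun s m => PySem.List.pySetD s m (PySem.List.pyGetD s m 0 + d)) s)
      (PySem.List.pyRepeat [(0 : Int)] (n+1))).getD a.toNat 0 = pvSigma a := by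
  rw [PySem.List.pyRepeat_singleton]
  have hL : ∀ d ∈ PySem.List.pyRange 1 (n+1) 1, 1 ≤ d := by
    intro d hd; exact ((PySem.List.mem_pyRange_one).1 hd).1
  rw [pv_outer n _ hL _ a.toNat (by simp [List.length_replicate]; omega)]
  rw [List.getD_eq_getElem?_getD]
  simp only [List.getElem?_replicate]
  rw [if_pos (by omega)]
  simp only [Option.getD_some, zero_add]
  -- now the filtered-range sum
  rw [PySem.List.pyRange_one]
  rw [show ((n:Int) + 1 - 1).toNat = n.toNat from by omega]
  rw [List.filter_map]
  have hcond : ∀ k : ℕ, (decide ((a.toNat : Int) ∈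
        PySem.List.pyRange (2*(1+(k:Int))) (n+1) (1+(k:Int))))
      = decide ((1+k) ∣ a.toNat ∧ 2*(1+k) ≤ a.toNat) := by
    intro k
    simp only [decide_eq_decide]
    rw [PySem.List.mem_pyRange_iff_of_pos (by omega)]
    constructor
    · rintro ⟨hge, hlt, hdvd⟩
      have hdvd' : (1+(k:Int)) ∣ (a.toNat : Int) := by
        have : (a.toNat : Int) = (a.toNat - 2*(1+(k:Int))) + (1+(k:Int)) * 2 := by ring
        rw [this]
        exact dvd_add (by rwa [show (a.toNat : Int) - 2*(1+(k:Int)) = ↑a.toNat - 2 * (1 + ↑k) from rfl] at hdvd) (Dvd.intro 2 rfl)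
      constructor
      · exact_mod_cast hdvd'
      · omega
    · rintro ⟨hdvd, hle⟩
      refine ⟨by omega, by omega, ?_⟩
      have : (1+(k:Int)) ∣ (a.toNat : Int) := by exact_mod_cast hdvd
      exact Dvd.dvd.sub this (Dvd.intro 2 (by ring))
  rw [show (fun d => decide ((a.toNat:Int) ∈ PySem.List.pyRange (2*d) (n+1) d)) ∘ (fun k : ℕ => 1 + (k:Int))
      = fun k : ℕ => decide ((a.toNat:Int) ∈ PySem.List.pyRange (2*(1+(k:Int))) (n+1) (1+(k:Int))) from rfl]
  rw [List.filter_congr (fun k _ => hcond k), pv_sum_range_ite]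
  have : (∑ k ∈ Finset.range n.toNat, if (1+k) ∣ a.toNat ∧ 2*(1+k) ≤ a.toNat then (1+(k:Int)) else 0)
      = ((∑ k ∈ Finset.range n.toNat, if (1+k) ∣ a.toNat ∧ 2*(1+k) ≤ a.toNat then 1+k else 0 : ℕ) : Int) := by
    push_cast
    refine Finset.sum_congr rfl (fun k _ => ?_)
    split_ifs <;> push_cast <;> ring
  simp only [decide_eq_true_eq]
  rw [this, pv_nat_sum2 a.toNat n.toNat (by omega) (by omega)]
  rfl

-- ---------- counting ----------

theorem pv_countP_unique (L : List Int) (p : Int → Bool) (c : Int) (hL : L.Nodup)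
    (hp : ∀ a, p a = true → a = c) :
    L.countP p = if c ∈ L ∧ p c then 1 else 0 := by
  induction L with
  | nil => simp
  | cons x L ih =>
      rcases List.nodup_cons.1 hL with ⟨hx, hL'⟩
      rw [List.countP_cons, ih hL']
      by_cases hpx : p x = true
      · have : x = c := hp x hpx
        subst this
        simp [hpx, hx]
      · have hxc : x = c → ¬ (p c = true) := by rintro rfl; exact hpx
        simp only [List.mem_cons]
        by_cases hc : c ∈ L <;> by_cases hpc : p c = true <;> simp_all <;> omega

-- the condition A's inner if effectively tests (after the dict lookups are resolved)
def pvCond (n a : Int) (prz : List (Int × Int)) : Bool :=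
  decide (a ≠ pvSA a ∧ 1 < pvSA a ∧ pvSA a < n ∧ pvSA (pvSA a) = a ∧ (pvSA a, a) ∉ prz)

-- loop invariant of A's pairing loop
theorem pv_A_inv (n : Int) (t : Int) (ht : 1 ≤ t) :
    (PySem.List.pyRange 1 t 1).foldl
        (fun prz a => if pvCond n a prz then prz ++ [(a, pvSA a)] else prz) []
      = ((PySem.List.pyRange 1 t 1).filter (pvQ n)).map (fun a => (a, pvSA a)) := by
  induction t, ht using Int.le_induction with
  | base => simp [PySem.List.pyRange_one_eq_nil (by omega : (1:Int) ≤ 1)]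
  | succ t ht ih =>
      rw [PySem.List.pyRange_one_succ_right ht, List.foldl_append, List.filter_append,
        List.map_append, ih]
      simp only [List.foldl_cons, List.foldl_nil, List.filter_cons]
      have hmem : ((pvSA t, t) ∈ ((PySem.List.pyRange 1 t 1).filter (pvQ n)).map
            (fun a => (a, pvSA a)))
          ↔ (1 ≤ pvSA t ∧ pvSA t < t ∧ pvQ n (pvSA t) ∧ pvSA (pvSA t) = t) := by
        simp only [List.mem_map, List.mem_filter, PySem.List.mem_pyRange_one]
        constructor
        · rintro ⟨x, ⟨⟨hx1, hx2⟩, hqx⟩, hpair⟩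
          rw [Prod.mk.injEq] at hpair
          obtain ⟨h1, h2⟩ := hpair
          subst h1
          exact ⟨hx1, hx2, hqx, h2⟩
        · rintro ⟨h1, h2, hq, hs⟩
          exact ⟨pvSA t, ⟨⟨h1, h2⟩, hq⟩, by rw [hs]⟩
      by_cases hc : pvCond n t (((PySem.List.pyRange 1 t 1).filter (pvQ n)).map
          (fun a => (a, pvSA a)))
      · rw [if_pos hc]
        simp only [pvCond, decide_eq_true_eq] at hc
        have hq : pvQ n t = true := by
          obtain ⟨c1, c2, c3, c4, c5⟩ := hc
          rw [hmem] at c5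
          simp only [pvQ, decide_eq_true_eq]
          refine ⟨c1, c2, c3, c4, ?_⟩
          by_cases hlt : t < pvSA t
          · exact Or.inl hlt
          · right
            intro ⟨htn1, htn2⟩
            apply c5
            refine ⟨by omega, by omega, ?_, c4⟩
            simp only [pvQ, decide_eq_true_eq]
            rw [c4]
            exact ⟨by omega, by omega, by omega, rfl, Or.inl (by omega)⟩
        rw [hq]
        simp
      · rw [if_neg hc]
        have hq : pvQ n t = false := by
          by_contra h
          have hq' : pvQ n t = true := by
            cases hqe : pvQ n t
            · exact absurd hqe h
            · rfl
          simp only [pvQ, decide_eq_true_eq] at hq'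
          obtain ⟨c1, c2, c3, c4, c5⟩ := hq'
          apply hc
          simp only [pvCond, decide_eq_true_eq]
          refine ⟨c1, c2, c3, c4, ?_⟩
          rw [hmem]
          rintro ⟨d1, d2, dq, ds⟩
          simp only [pvQ, decide_eq_true_eq] at dq
          obtain ⟨e1, e2, e3, e4, e5⟩ := dq
          rcases c5 with c5 | c5
          · omega
          · rcases e5 with e5 | e5 <;> rw [c4] at * <;> omega
        rw [hq]
        simp

theorem pv_A_loop (n : Int) (hn : 2 ≤ n) :
    zaprzyjaznione n = some (((PySem.List.pyRange 1 (n+1) 1).countP (pvQ n) : ℕ) : Int) := by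
  unfold zaprzyjaznione
  simp only []
  rw [if_neg (by omega)]
  have hnd : (PySem.List.pyRange 1 (n+1) 1).Nodup := pv_nodup_pyRange_pos _ _ _ (by omega)
  rw [pv_dict_keys _ _ hnd]
  have hget : ∀ x ∈ PySem.List.pyRange 1 (n+1) 1,
      ((PySem.List.pyRange 1 (n+1) 1).foldl
        (fun d x => d.insert x (pvSA x)) PySem.Dict.empty).getD x 0 = pvSA x :=
    fun x hx => pv_dict_getD _ _ _ _ hnd hx
  rw [PySem.List.foldl_congr_mem _ _
    (fun prz a => if pvCond n a prz then prz ++ [(a, pvSA a)] else prz) [] ?_]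
  · rw [pv_A_inv n (n+1) (by omega)]
    simp [List.countP_eq_length_filter]
  · intro prz a ha
    rcases (PySem.List.mem_pyRange_one).1 ha with ⟨ha1, ha2⟩
    simp only [pvCond, decide_eq_true_eq]
    rw [hget a ha]
    by_cases hb : 1 < pvSA a ∧ pvSA a < n
    · rw [hget (pvSA a) ((PySem.List.mem_pyRange_one).2 ⟨by omega, by omega⟩)]
    · rw [if_neg (by tauto), if_neg (by tauto)]

theorem pv_B_loop (n : Int) (hn : 2 ≤ n) :
    zaprzyjaznione_alt n = some (((PySem.List.pyRange 1 (n+1) 1).countP (pvR n) : ℕ) : Int) := by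
  unfold zaprzyjaznione_alt
  simp only []
  rw [if_neg (by omega), if_pos (by omega)]
  congr 1
  rw [PySem.List.foldl_congr_mem _ _
    (fun c a => if (pvR n a : Bool) then c + 1 else c) 0 ?_]
  · rw [PySem.List.foldl_ite_add_one (p := fun a => pvR n a = true) _ 0]
    simp
  · intro c a ha
    rcases (PySem.List.mem_pyRange_one).1 ha with ⟨ha1, ha2⟩
    have hsa : PySem.List.pyGetD ((PySem.List.pyRange 1 (n+1) 1).foldl (fun s d =>
        (PySem.List.pyRange (2*d) (n+1) d).foldl
          (fun s m => PySem.List.pySetD s m (PySem.List.pyGetD s m 0 + d)) s)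
        (PySem.List.pyRepeat [(0 : Int)] (n+1))) a 0 = pvSigma a := by
      rw [PySem.List.pyGetD_of_nonneg _ _ (by omega)]
      exact pv_sieve n (by omega) a ha1 (by omega)
    simp only [hsa]
    by_cases hb : a < pvSigma a ∧ pvSigma a ≤ n
    · have hbmem : PySem.List.pyGetD ((PySem.List.pyRange 1 (n+1) 1).foldl (fun s d =>
          (PySem.List.pyRange (2*d) (n+1) d).foldl
            (fun s m => PySem.List.pySetD s m (PySem.List.pyGetD s m 0 + d)) s)
          (PySem.List.pyRepeat [(0 : Int)] (n+1))) (pvSigma a) 0 = pvSigma (pvSigma a) := by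
        rw [PySem.List.pyGetD_of_nonneg _ _ (by omega)]
        exact pv_sieve n (by omega) _ (by omega) (by omega)
      simp only [hbmem, pvR]
      simp
    · simp only [pvR]
      rw [if_neg (by tauto), if_neg (by simp only [decide_eq_true_eq]; tauto)]

theorem pv_Q_iff_Q' (n a : Int) (ha : 1 ≤ a) : pvQ n a = pvQ' n a := by
  simp only [pvQ, pvQ', decide_eq_decide]
  by_cases ha2 : a = 2
  · subst ha2
    rw [pvSA_two, pvSA_three, pvSigma_two, pvSigma_one]
    constructor
    · rintro ⟨-, -, -, h, -⟩; omega
    · rintro ⟨-, h, -⟩; omega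
  · rw [pvSA_eq_sigma' a ha2 ha]
    by_cases hb2 : pvSigma a = 2
    · rw [hb2, pvSA_two, pvSigma_two]
      constructor
      · rintro ⟨-, -, -, h3a, -⟩
        exfalso
        rw [← h3a] at hb2
        rw [pvSigma_three] at hb2
        omega
      · rintro ⟨-, -, -, h1a, -⟩
        exfalso
        rw [← h1a] at hb2
        rw [pvSigma_one] at hb2
        omega
    · rcases Int.lt_or_le (pvSigma a) 1 with hb0 | hb1
      · have h0 : ¬ (1 < pvSigma a) := by omega
        constructor
        · rintro ⟨-, h, -⟩; omega
        · rintro ⟨-, h, -⟩; omega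
      · rw [pvSA_eq_sigma' (pvSigma a) hb2 hb1]

theorem pv_countP_split (l : List Int) (p q : Int → Bool) :
    l.countP p = l.countP (fun a => p a && q a) + l.countP (fun a => p a && !q a) := by
  induction l with
  | nil => rfl
  | cons x l ih =>
      rw [List.countP_cons, List.countP_cons, List.countP_cons, ih]
      cases hp : p x <;> cases hq : q x <;> simp [hp, hq] <;> omega

theorem pv_count_eq (n : Int) (hn : 2 ≤ n) :
    (PySem.List.pyRange 1 (n+1) 1).countP (pvQ' n) =
      (PySem.List.pyRange 1 (n+1) 1).countP (pvR n) := by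
  rw [PySem.List.pyRange_one_succ_right (by omega : (1:Int) ≤ n)]
  rw [List.countP_append, List.countP_append]
  have hRn : pvR n n = false := by
    simp only [pvR, decide_eq_false_iff_not]
    rintro ⟨h1, h2, -⟩
    omega
  have e1 : (PySem.List.pyRange 1 n 1).countP (pvQ' n)
      = (PySem.List.pyRange 1 n 1).countP (fun a => pvR n a && !(decide (pvSigma a = n))) := by
    apply List.countP_congr
    intro a hamem
    rcases (PySem.List.mem_pyRange_one).1 hamem with ⟨h1, h2⟩
    rw [Bool.eq_iff_iff]
    simp only [pvQ', pvR, Bool.and_eq_true, Bool.not_eq_true', decide_eq_true_eq,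
      decide_eq_false_iff_not, iff_true]
    by_cases ha1 : a = 1
    · subst ha1
      rw [pvSigma_one]
      omega
    · omega
  have e2 : (PySem.List.pyRange 1 n 1).countP (pvR n)
      = (PySem.List.pyRange 1 n 1).countP (fun a => pvR n a && (decide (pvSigma a = n)))
        + (PySem.List.pyRange 1 n 1).countP (fun a => pvR n a && !(decide (pvSigma a = n))) :=
    pv_countP_split _ _ _
  have e3 : (PySem.List.pyRange 1 n 1).countP (fun a => pvR n a && (decide (pvSigma a = n)))
      = if pvQ' n n then 1 else 0 := by
    rw [pv_countP_unique _ _ (pvSigma n) (pv_nodup_pyRange_pos _ _ _ (by omega)) ?hp]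
    case hp =>
      intro a hpa
      simp only [pvR, Bool.and_eq_true, decide_eq_true_eq] at hpa
      obtain ⟨⟨-, -, hba⟩, hbn⟩ := hpa
      rw [← hbn, hba]
    have hiff : (pvSigma n ∈ PySem.List.pyRange 1 n
        ∧ (pvR n (pvSigma n) && decide (pvSigma (pvSigma n) = n)) = true)
        ↔ (pvQ' n n = true) := by
      constructor
      · rintro ⟨hmem, hps⟩
        rcases (PySem.List.mem_pyRange_one).1 hmem with ⟨h1, h2⟩
        simp only [pvR, Bool.and_eq_true, decide_eq_true_eq] at hps
        obtain ⟨⟨p1, p2, p3⟩, p4⟩ := hps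
        simp only [pvQ', decide_eq_true_eq]
        refine ⟨by omega, ?_, by omega, p4, Or.inr (by omega)⟩
        -- 1 < pvSigma n: pvSigma n ≥ 1; if = 1 then pvSigma 1 = 0 ≠ n
        rcases Int.lt_or_le 1 (pvSigma n) with h | h
        · exact h
        · exfalso
          have hs1 : pvSigma n = 1 := by omega
          rw [hs1, pvSigma_one] at p4
          omega
      · intro hq
        simp only [pvQ', decide_eq_true_eq] at hq
        obtain ⟨q1, q2, q3, q4, -⟩ := hq
        refine ⟨(PySem.List.mem_pyRange_one).2 ⟨by omega, by omega⟩, ?_⟩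
        simp only [pvR, Bool.and_eq_true, decide_eq_true_eq]
        exact ⟨⟨by rw [q4]; omega, by rw [q4], by rw [q4]⟩, q4⟩
    exact if_congr hiff rfl rfl
  have e4 : [n].countP (pvQ' n) = if pvQ' n n then 1 else 0 := by
    rcases h : pvQ' n n <;> simp [List.countP_cons, h]
  have e5 : [n].countP (pvR n) = 0 := by
    simp [List.countP_cons, hRn]
  rw [e1, e2, e3, e4, e5]
  omega

-- ===== VERDICT (by name: the statement is the Claim_ definition above) =====
theorem zaprzyjaznione_spec : Claim_equal_zaprzyjaznione := by
  intro n _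
  unfold Spec_zaprzyjaznione
  by_cases hn1 : n = 1
  · subst hn1
    simp [zaprzyjaznione, zaprzyjaznione_alt]
  · rcases Int.lt_or_le n 2 with h2 | h2
    · -- n ≤ 0: every range is empty, both return some 0
      have hr : PySem.List.pyRange 1 (n+1) 1 = [] :=
        PySem.List.pyRange_one_eq_nil (by omega)
      unfold zaprzyjaznione zaprzyjaznione_alt
      simp only []
      rw [if_neg hn1, if_neg hn1, hr]
      simp [PySem.Dict.keys_empty]
    · rw [pv_A_loop n h2, pv_B_loop n h2]
      have hQQ' : (PySem.List.pyRange 1 (n+1) 1).countP (pvQ n)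
          = (PySem.List.pyRange 1 (n+1) 1).countP (pvQ' n) := by
        apply List.countP_congr
        intro a hamem
        rw [pv_Q_iff_Q' n a ((PySem.List.mem_pyRange_one).1 hamem).1]
      rw [hQQ', pv_count_eq n h2]
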